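-- pv_equiv track=rewrite | github.com/rookinc/hyperxi_lab | scripts/grow_minusI_transport_subgroup.py | cycle_histogram
-- ===== SOURCE A (Python) =====
-- from collections import Counter, deque
--
-- def cycle_histogram(perm: tuple[int, ...]) -> dict[int, int]:
--     n = len(perm)
--     seen = [False] * n
--     hist = Counter()
--     for i in range(n):
--         if seen[i]:
--             continue
--         j = i
--         L = 0
--         while not seen[j]:
--             seen[j] = True
--             j = perm[j]
--             L += 1
--         hist[L] += 1
--     return dict(sorted(hist.items()))
-- ===== SOURCE B (Python) =====
-- from collections import Counter
--
-- def cycle_histogram(perm):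
--     n = len(perm)
--     owner = [None] * n          # owner[v] = outer index whose walk first reached v
--     for s in range(n):
--         j = s
--         while owner[j] is None:
--             owner[j] = s
--             j = perm[j]
--     sizes = Counter(owner)          # nodes labelled by each start
--     hist = Counter(sizes.values())  # how many starts own each size
--     return dict(sorted(hist.items()))
-- ===== Notes on version B (the rewrite author's own statement) =====
-- stated objective: alternative
-- what changed: Instead of A's boolean seen-array with an inline cycle-length counter feeding a Counter during the walk, B labels every node with the outer start that first reaches it (an owner array) and derives the histogram afterwards by two counting passes: nodes per owner, then owners per group size.
import Mathlib
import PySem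

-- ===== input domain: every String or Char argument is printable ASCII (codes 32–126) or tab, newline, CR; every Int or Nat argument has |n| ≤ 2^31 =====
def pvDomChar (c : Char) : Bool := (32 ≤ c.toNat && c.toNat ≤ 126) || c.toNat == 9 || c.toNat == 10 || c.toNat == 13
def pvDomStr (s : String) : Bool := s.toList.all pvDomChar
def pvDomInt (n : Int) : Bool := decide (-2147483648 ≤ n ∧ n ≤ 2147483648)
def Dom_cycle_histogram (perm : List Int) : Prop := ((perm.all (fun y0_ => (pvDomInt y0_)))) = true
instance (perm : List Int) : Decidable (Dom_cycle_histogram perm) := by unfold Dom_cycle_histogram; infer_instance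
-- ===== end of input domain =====

-- B replaces A's boolean seen-array with an inline length counter by an owner-labelling
-- array and two counting passes afterwards (objective: alternative decomposition).

-- ===== PORT A =====
-- inner 'while not seen[j]: seen[j] = True; j = perm[j]; L += 1' (the fuel only makes the
-- loop total; pyGet? none = IndexError, where the Python raises)
def pvALoop (perm : List Int) : ℕ → List Bool → Int → Int → List Bool × Int
  | 0, seen, _, L => (seen, L)
  | fuel + 1, seen, j, L =>
    match PySem.List.pyGet? seen j with
    | none => (seen, L)
    | some b =>
      if b then (seen, L)
      else
        let seen' := PySem.List.pySetD seen j true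
        match PySem.List.pyGet? perm j with
        | none => (seen', L + 1)
        | some j' => pvALoop perm fuel seen' j' (L + 1)

def cycle_histogram (perm : List Int) : List (Int × Int) :=
  let n : Int := (perm.length : Int)
  let st :=
    (PySem.List.pyRange 0 n 1).foldl
      (fun (st : List Bool × PySem.Dict Int Int) i =>
        match PySem.List.pyGet? st.1 i with
        | none => st
        | some b =>
          if b then st
          else
            let r := pvALoop perm (perm.length + 1) st.1 i 0
            (r.1, st.2.modify r.2 0 (· + 1)))
      (List.replicate perm.length false, PySem.Dict.empty)
  PySem.List.sorted2 st.2.items (fun p => p.1) (fun p => p.2) false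

-- ===== PORT B =====
-- inner 'while owner[j] is None: owner[j] = s; j = perm[j]' (fuel for totality as in A)
def pvBLoop (perm : List Int) : ℕ → List (Option Int) → Int → Int → List (Option Int)
  | 0, owner, _, _ => owner
  | fuel + 1, owner, j, s =>
    match PySem.List.pyGet? owner j with
    | none => owner
    | some o =>
      match o with
      | some _ => owner
      | none =>
        let owner' := PySem.List.pySetD owner j (some s)
        match PySem.List.pyGet? perm j with
        | none => owner'
        | some j' => pvBLoop perm fuel owner' j' s

def cycle_histogram_alt (perm : List Int) : List (Int × Int) :=
  let n : Int := (perm.length : Int)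
  let owner :=
    (PySem.List.pyRange 0 n 1).foldl
      (fun owner s => pvBLoop perm (perm.length + 1) owner s s)
      (List.replicate perm.length (none : Option Int))
  let sizes := PySem.Dict.counter owner
  let hist := PySem.Dict.counter sizes.values
  PySem.List.sorted2 hist.items (fun p => p.1) (fun p => p.2) false

-- ===== PRECONDITION & SPEC =====
-- Pre_ is exactly where the Python A returns: every stored index must be a valid Python
-- index into the tuple, otherwise A raises IndexError during some walk.
def Pre_cycle_histogram (perm : List Int) : Prop :=
  ∀ v ∈ perm, -(perm.length : Int) ≤ v ∧ v < (perm.length : Int)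
instance (perm : List Int) : Decidable (Pre_cycle_histogram perm) := by
  unfold Pre_cycle_histogram; infer_instance

def pvWitness_cycle_histogram : List Int := [2, 0, 1, 3, -1, 4]

def Spec_cycle_histogram (perm : List Int) (out : List (Int × Int)) : Prop := out = cycle_histogram_alt perm
instance (perm : List Int) (out : List (Int × Int)) : Decidable (Spec_cycle_histogram perm out) := by unfold Spec_cycle_histogram; infer_instance

-- ===== CLAIM (what is proved, stated in full; the proofs are below) =====
def Claim_equal_cycle_histogram : Prop := ∀ (perm : List Int), Dom_cycle_histogram perm → Pre_cycle_histogram perm → Spec_cycle_histogram perm (cycle_histogram perm)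

-- ===== LEMMAS AND PROOFS =====

-- ---- Python index normalisation ----

lemma pv_pyIdx_lt (n : ℕ) (j : Int) (k : ℕ) (h : PySem.List.pyIdx? n j = some k) : k < n := by
  unfold PySem.List.pyIdx? at h
  split_ifs at h with h1 h2 h3
  all_goals try (cases h)
  all_goals omega

lemma pv_get_norm {α : Type} (xs : List α) (j : Int) (k : ℕ) (d : α)
    (h : PySem.List.pyIdx? xs.length j = some k) :
    PySem.List.pyGet? xs j = some (xs.getD k d) := by
  have hk := pv_pyIdx_lt _ _ _ h
  unfold PySem.List.pyGet?
  rw [h]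
  simp [List.getElem?_eq_getElem hk]

lemma pv_set_norm {α : Type} (xs : List α) (j : Int) (k : ℕ) (v : α)
    (h : PySem.List.pyIdx? xs.length j = some k) :
    PySem.List.pySetD xs j v = xs.set k v := by
  unfold PySem.List.pySetD PySem.List.pySet?
  rw [h]
  rfl

lemma pv_get_none {α : Type} (xs : List α) (j : Int)
    (h : PySem.List.pyIdx? xs.length j = none) :
    PySem.List.pyGet? xs j = none := by
  unfold PySem.List.pyGet?
  rw [h]
  rfl

lemma pv_pyIdx_natCast (n k : ℕ) (hk : k < n) :
    PySem.List.pyIdx? n ((k : ℕ) : Int) = some k := by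
  unfold PySem.List.pyIdx?
  have h1 : (0 : Int) ≤ (k : Int) := by omega
  have h2 : ((k : ℕ) : Int) < (n : Int) := by omega
  rw [if_pos h1, if_pos h2]
  simp

lemma pv_getD_set {α : Type} (xs : List α) (k v : ℕ) (w d : α) (hk : k < xs.length) :
    (xs.set k w).getD v d = if v = k then w else xs.getD v d := by
  rcases Nat.lt_or_ge v xs.length with hv | hv
  · rw [List.getD_eq_getElem _ _ (by simpa using hv), List.getElem_set,
      List.getD_eq_getElem _ _ hv]
    by_cases h : v = k
    · simp [h]
    · have hne' : k ≠ v := fun hh => h hh.symm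
      simp [h, hne']
  · have hne : ¬ v = k := by omega
    rw [if_neg hne, List.getD_eq_default _ _ (by simpa using hv),
      List.getD_eq_default _ _ hv]

-- ---- counting in the owner array ----

lemma pv_count_set (l : List (Option Int)) (k : ℕ) (s : Int) (hk : k < l.length)
    (hnone : l.getD k none = none) (x : Int) :
    (l.set k (some s)).count (some x) = l.count (some x) + (if x = s then 1 else 0) := by
  induction l generalizing k with
  | nil => simp at hk
  | cons a t ih =>
    cases k with
    | zero =>
      have ha : a = none := by simpa using hnone
      subst ha
      by_cases hxs : x = s
      · simp [hxs]
      · have h2 : ¬ s = x := fun hh => hxs hh.symm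
        simp [hxs, h2]
    | succ k =>
      have hk' : k < t.length := by simpa using hk
      have hnone' : t.getD k none = none := by simpa using hnone
      simp only [List.set_cons_succ, List.count_cons]
      rw [ih k hk' hnone']
      ring

-- ---- the two inner while loops run in lockstep ----
-- A's seen array is exactly B's owner array mapped through Option.isSome, A's length
-- counter counts exactly the nodes B labels with s in this walk.
lemma pv_walk (perm : List Int) :
    ∀ (fuel : ℕ) (owner : List (Option Int)) (j : Int) (L : Int) (s : Int),
      ∃ (owner' : List (Option Int)) (cnt : ℕ),
        pvBLoop perm fuel owner j s = owner' ∧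
        pvALoop perm fuel (owner.map (fun o => o.isSome)) j L =
          (owner'.map (fun o => o.isSome), L + (cnt : Int)) ∧
        owner'.length = owner.length ∧
        owner'.count (some s) = owner.count (some s) + cnt ∧
        (∀ x : Int, x ≠ s → owner'.count (some x) = owner.count (some x)) ∧
        (∀ x : Int, some x ∈ owner' ↔ (some x ∈ owner ∨ (cnt ≠ 0 ∧ x = s))) ∧
        (∀ v, v < owner.length → (owner.getD v none).isSome →
          owner'.getD v none = owner.getD v none) ∧
        (∀ k, 0 < fuel → PySem.List.pyIdx? owner.length j = some k →
          owner.getD k none = none → owner'.getD k none = some s) := by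
  intro fuel
  induction fuel with
  | zero =>
    intro owner j L s
    refine ⟨owner, 0, rfl, by simp [pvALoop], rfl, by simp, fun _ _ => rfl,
      by simp, fun _ _ h => rfl, fun k h _ _ => absurd h (by omega)⟩
  | succ fuel ih =>
    intro owner j L s
    cases hidx : PySem.List.pyIdx? owner.length j with
    | none =>
      have eA : PySem.List.pyGet? (owner.map (fun o => o.isSome)) j = none := by
        apply pv_get_none
        rw [List.length_map]
        exact hidx
      have eB : PySem.List.pyGet? owner j = none := pv_get_none owner j hidx
      refine ⟨owner, 0, ?_, ?_, rfl, by simp, fun _ _ => rfl, by simp,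
        fun _ _ h => rfl, fun k _ h _ => absurd h (by simp)⟩
      · simp only [pvBLoop, eB]
      · simp only [pvALoop, eA]
        simp
    | some k =>
      have hk : k < owner.length := pv_pyIdx_lt _ _ _ hidx
      have eA : PySem.List.pyGet? (owner.map (fun o => o.isSome)) j =
          some ((owner.getD k none).isSome) := by
        have h1 : PySem.List.pyIdx? (owner.map (fun o => o.isSome)).length j = some k := by
          rw [List.length_map]; exact hidx
        rw [pv_get_norm _ j k false h1]
        congr 1
        rcases Nat.lt_or_ge k owner.length with hlt | hge
        · rw [List.getD_eq_getElem _ _ (by simpa using hlt),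
            List.getD_eq_getElem _ _ hlt]
          simp
        · omega
      have eB : PySem.List.pyGet? owner j = some (owner.getD k none) :=
        pv_get_norm owner j k none hidx
      cases ho : owner.getD k none with
      | some t =>
        have eA' : PySem.List.pyGet? (owner.map (fun o => o.isSome)) j = some true := by
          rw [eA, ho]; rfl
        have eB' : PySem.List.pyGet? owner j = some (some t) := by rw [eB, ho]
        refine ⟨owner, 0, ?_, ?_, rfl, by simp, fun _ _ => rfl, by simp,
          fun _ _ h => rfl, ?_⟩
        · simp only [pvBLoop, eB']
        · simp only [pvALoop, eA', if_true]
          simp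
        · intro k' _ hidx' hnone
          injection hidx' with hkk
          rw [← hkk] at hnone
          rw [ho] at hnone
          cases hnone
      | none =>
        have eA' : PySem.List.pyGet? (owner.map (fun o => o.isSome)) j = some false := by
          rw [eA, ho]; rfl
        have eB' : PySem.List.pyGet? owner j = some (none : Option Int) := by rw [eB, ho]
        have hsetA : PySem.List.pySetD (owner.map (fun o => o.isSome)) j true =
            (owner.set k (some s)).map (fun o => o.isSome) := by
          rw [pv_set_norm _ j k true (by rw [List.length_map]; exact hidx)]
          rw [List.map_set]
          rfl
        have hsetB : PySem.List.pySetD owner j (some s) = owner.set k (some s) :=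
          pv_set_norm owner j k (some s) hidx
        -- facts about the one-step-updated owner
        have hlen2 : (owner.set k (some s)).length = owner.length := by simp
        have hcnt2 : ∀ x : Int, (owner.set k (some s)).count (some x) =
            owner.count (some x) + (if x = s then 1 else 0) :=
          fun x => pv_count_set owner k s hk ho x
        have hmem2 : ∀ x : Int, some x ∈ owner.set k (some s) ↔
            (some x ∈ owner ∨ x = s) := by
          intro x
          constructor
          · intro h
            have := List.count_pos_iff.mpr h
            rw [hcnt2 x] at this
            by_cases hxs : x = s
            · exact Or.inr hxs
            · rw [if_neg hxs] at this
              exact Or.inl (List.count_pos_iff.mp (by omega))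
          · intro h
            apply List.count_pos_iff.mp
            rw [hcnt2 x]
            rcases h with h | h
            · have := List.count_pos_iff.mpr h
              omega
            · rw [if_pos h]; omega
        have hgd2 : ∀ v, (owner.set k (some s)).getD v none =
            if v = k then some s else owner.getD v none :=
          fun v => pv_getD_set owner k v (some s) none hk
        cases hjp : PySem.List.pyGet? perm j with
        | none =>
          refine ⟨owner.set k (some s), 1, ?_, ?_, hlen2, ?_, ?_, ?_, ?_, ?_⟩
          · simp only [pvBLoop, eB', hsetB, hjp]
          · simp only [pvALoop, eA', hsetA, hjp]
            simp
          · rw [hcnt2 s, if_pos rfl]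
          · intro x hx
            rw [hcnt2 x, if_neg hx]
            omega
          · intro x
            rw [hmem2 x]
            simp
          · intro v hv hsome
            rw [hgd2 v]
            by_cases hvk : v = k
            · rw [hvk] at hsome
              rw [ho] at hsome
              cases hsome
            · rw [if_neg hvk]
          · intro k' _ hidx' _
            injection hidx' with hkk
            rw [← hkk, hgd2 k, if_pos rfl]
        | some j' =>
          obtain ⟨owner', cnt, hB, hA, hlen', hcntS, hcntO, hmem', hpers, hlab⟩ :=
            ih (owner.set k (some s)) j' (L + 1) s
          refine ⟨owner', cnt + 1, ?_, ?_, by rw [hlen', hlen2], ?_, ?_, ?_, ?_, ?_⟩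
          · simp only [pvBLoop, eB', hsetB, hjp]
            exact hB
          · simp only [pvALoop, eA', hsetA, hjp]
            rw [hA]
            have hc : (L + 1) + (cnt : Int) = L + ((cnt + 1 : ℕ) : Int) := by
              push_cast
              ring
            rw [hc]
            simp
          · rw [hcntS, hcnt2 s, if_pos rfl]
            ring
          · intro x hx
            rw [hcntO x hx, hcnt2 x, if_neg hx]
            omega
          · intro x
            rw [hmem' x, hmem2 x]
            constructor
            · rintro ((h | h) | ⟨_, h⟩)
              · exact Or.inl h
              · exact Or.inr ⟨by omega, h⟩
              · exact Or.inr ⟨by omega, h⟩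
            · rintro (h | ⟨_, h⟩)
              · exact Or.inl (Or.inl h)
              · exact Or.inl (Or.inr h)
          · intro v hv hsome
            have hvk : v ≠ k := by
              intro hvk
              rw [hvk, ho] at hsome
              cases hsome
            have h2 : (owner.set k (some s)).getD v none = owner.getD v none := by
              rw [hgd2 v, if_neg hvk]
            rw [← h2]
            rw [hpers v (by omega) (by rw [h2]; exact hsome)]
          · intro k' _ hidx' _
            injection hidx' with hkk
            have h2 : (owner.set k (some s)).getD k' none = some s := by
              rw [← hkk, hgd2 k, if_pos rfl]
            rw [hpers k' (by omega) (by rw [h2]; rfl)]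
            exact h2

-- ---- the outer loops keep: A's histogram = Counter of the walk lengths ls,
--      and ls is (up to order) the list of owner-group sizes of B's array ----
lemma pv_fold (perm : List Int) :
    ∀ (fuel lo : ℕ) (owner : List (Option Int)) (ls starts : List Int),
      perm.length - lo ≤ fuel → lo ≤ perm.length →
      owner.length = perm.length →
      (∀ v, v < lo → (owner.getD v none).isSome) →
      (∀ x : Int, some x ∈ owner ↔ x ∈ starts) →
      ls.Perm (starts.map (fun s => (owner.count (some s) : Int))) →
      (∀ x ∈ starts, 0 ≤ x ∧ x < (lo : Int)) →
      starts.Nodup →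
      ∃ (owner' : List (Option Int)) (ls' starts' : List Int),
        ((PySem.List.pyRange ((lo : ℕ) : Int) ((perm.length : ℕ) : Int) 1).foldl
          (fun (st : List Bool × PySem.Dict Int Int) i =>
            match PySem.List.pyGet? st.1 i with
            | none => st
            | some b =>
              if b then st
              else
                let r := pvALoop perm (perm.length + 1) st.1 i 0
                (r.1, st.2.modify r.2 0 (· + 1)))
          (owner.map (fun o => o.isSome), PySem.Dict.counter ls)).2 =
            PySem.Dict.counter ls' ∧
        (PySem.List.pyRange ((lo : ℕ) : Int) ((perm.length : ℕ) : Int) 1).foldl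
          (fun owner s => pvBLoop perm (perm.length + 1) owner s s) owner = owner' ∧
        owner'.length = perm.length ∧
        (∀ v, v < perm.length → (owner'.getD v none).isSome) ∧
        (∀ x : Int, some x ∈ owner' ↔ x ∈ starts') ∧
        ls'.Perm (starts'.map (fun s => (owner'.count (some s) : Int))) ∧
        starts'.Nodup := by
  intro fuel
  induction fuel with
  | zero =>
    intro lo owner ls starts hfuel hlo hlen hpref hmem hperm hrange hnodup
    have : lo = perm.length := by omega
    subst this
    rw [PySem.List.pyRange_one_eq_nil (by omega)]
    exact ⟨owner, ls, starts, rfl, rfl, hlen, fun v hv => hpref v (by omega),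
      hmem, hperm, hnodup⟩
  | succ fuel ih =>
    intro lo owner ls starts hfuel hlo hlen hpref hmem hperm hrange hnodup
    rcases Nat.lt_or_ge lo perm.length with hlt | hge
    · have hcastlt : ((lo : ℕ) : Int) < ((perm.length : ℕ) : Int) := by omega
      rw [PySem.List.pyRange_one_cons hcastlt]
      have hcast1 : ((lo : ℕ) : Int) + 1 = (((lo + 1 : ℕ)) : Int) := by push_cast; ring
      rw [hcast1, List.foldl_cons, List.foldl_cons]
      have hidx : PySem.List.pyIdx? owner.length ((lo : ℕ) : Int) = some lo := by
        rw [hlen]; exact pv_pyIdx_natCast perm.length lo hlt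
      obtain ⟨owner2, cnt, hB, hA, hlen2, hcntS, hcntO, hmem2, hpers, hlab⟩ :=
        pv_walk perm (perm.length + 1) owner ((lo : ℕ) : Int) 0 ((lo : ℕ) : Int)
      have eA : PySem.List.pyGet? (owner.map (fun o => o.isSome)) ((lo : ℕ) : Int) =
          some ((owner.getD lo none).isSome) := by
        rw [pv_get_norm _ _ lo false (by rw [List.length_map]; exact hidx)]
        congr 1
        rw [List.getD_eq_getElem _ _ (by simpa using (hlen ▸ hlt)),
          List.getD_eq_getElem _ _ (hlen ▸ hlt)]
        simp
      cases ho : owner.getD lo none with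
      | some t =>
        -- already labelled: A skips, B's walk stops at once
        have eA' : PySem.List.pyGet? (owner.map (fun o => o.isSome)) ((lo : ℕ) : Int) =
            some true := by rw [eA, ho]; rfl
        have eB' : PySem.List.pyGet? owner ((lo : ℕ) : Int) = some (some t) := by
          rw [pv_get_norm owner _ lo none hidx, ho]
        have hBstep : pvBLoop perm (perm.length + 1) owner ((lo : ℕ) : Int)
            ((lo : ℕ) : Int) = owner := by
          simp only [pvBLoop, eB']
        simp only [eA', if_true, hBstep]
        exact ih (lo + 1) owner ls starts (by omega) (by omega) hlen
          (by
            intro v hv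
            rcases Nat.lt_or_ge v lo with h | h
            · exact hpref v h
            · have : v = lo := by omega
              rw [this, ho]; rfl)
          hmem hperm
          (by intro x hx; have := hrange x hx; omega) hnodup
      | none =>
        -- fresh start: A walks and counts, B's walk labels the same nodes with lo
        have eA' : PySem.List.pyGet? (owner.map (fun o => o.isSome)) ((lo : ℕ) : Int) =
            some false := by rw [eA, ho]; rfl
        have hlo0 : owner.count (some ((lo : ℕ) : Int)) = 0 := by
          rw [List.count_eq_zero]
          intro hin
          have := (hmem _).mp hin
          have := hrange _ this
          omega
        have hcnt0 : cnt ≠ 0 := by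
          intro hc0
          have h1 := hlab lo (by omega) hidx ho
          have h2 : some ((lo : ℕ) : Int) ∈ owner2 := by
            have hlolt : lo < owner2.length := by omega
            rw [List.getD_eq_getElem _ _ hlolt] at h1
            rw [← h1]
            exact List.getElem_mem hlolt
          rcases (hmem2 _).mp h2 with h | ⟨hc, _⟩
          · have := (hmem _).mp h
            have := hrange _ this
            omega
          · exact hc hc0
        simp only [eA', if_neg (by simp : ¬ false = true), hA, hB]
        have hkey : (0 : Int) + (cnt : Int) = ((cnt : ℕ) : Int) := by simp
        have hd : (PySem.Dict.counter ls).modify ((0 : Int) + (cnt : Int)) 0 (· + 1) =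
            PySem.Dict.counter (ls ++ [(cnt : Int)]) := by
          rw [PySem.Dict.counter_append_singleton, hkey]
        rw [hd]
        refine ih (lo + 1) owner2 (ls ++ [(cnt : Int)]) (starts ++ [((lo : ℕ) : Int)])
          (by omega) (by omega) (by omega)
          ?_ ?_ ?_ ?_ ?_
        · intro v hv
          rcases Nat.lt_or_ge v lo with h | h
          · have hp := hpref v h
            rw [hpers v (by omega) hp]
            exact hp
          · have hveq : v = lo := by omega
            rw [hveq, hlab lo (by omega) hidx ho]
            rfl
        · intro x
          rw [hmem2 x, hmem x]
          simp only [List.mem_append, List.mem_singleton]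
          constructor
          · rintro (h | ⟨_, h⟩)
            · exact Or.inl h
            · exact Or.inr h
          · rintro (h | h)
            · exact Or.inl h
            · exact Or.inr ⟨hcnt0, h⟩
        · rw [List.map_append]
          apply List.Perm.append
          · refine hperm.trans (List.Perm.of_eq ?_)
            apply List.map_congr_left
            intro x hx
            have hxlo : x ≠ ((lo : ℕ) : Int) := by
              have := hrange x hx
              omega
            rw [hcntO x hxlo]
          · simp only [List.map_cons, List.map_nil]
            rw [hcntS, hlo0]
            simp
        · intro x hx
          rcases List.mem_append.mp hx with h | h
          · have := hrange x h
            constructor <;> omega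
          · have hxeq : x = ((lo : ℕ) : Int) := by simpa using h
            constructor <;> omega
        · rw [List.nodup_append]
          refine ⟨hnodup, List.nodup_singleton _, ?_⟩
          intro a ha b hb
          have h2 : b = ((lo : ℕ) : Int) := by simpa using hb
          have h1 := hrange a ha
          omega
    · have : lo = perm.length := by omega
      subst this
      rw [PySem.List.pyRange_one_eq_nil (by omega)]
      exact ⟨owner, ls, starts, rfl, rfl, hlen, fun v hv => hpref v (by omega),
        hmem, hperm, hnodup⟩

-- ---- sorting pairs with distinct first components ----

lemma pv_insertBy_congr {α : Type} (bef1 bef2 : α → α → Bool) (x : α) :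
    ∀ (acc : List α), (∀ b ∈ acc, bef1 x b = bef2 x b) →
      PySem.List.insertBy bef1 x acc = PySem.List.insertBy bef2 x acc := by
  intro acc
  induction acc with
  | nil => intro _; rfl
  | cons y ys ih =>
    intro h
    have hy : bef1 x y = bef2 x y := h y (by simp)
    by_cases hxy : bef2 x y = true
    · simp only [PySem.List.insertBy, hy, hxy]
      simp
    · have h1 : bef1 x y = false := by rw [hy]; simpa using hxy
      have h2 : bef2 x y = false := by simpa using hxy
      simp only [PySem.List.insertBy, h1, h2]
      simp only [Bool.false_eq_true, if_false]
      rw [ih (fun b hb => h b (by simp [hb]))]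

lemma pv_foldl_insertBy_congr {α : Type} (bef1 bef2 : α → α → Bool) :
    ∀ (l acc : List α),
      (∀ x ∈ l, ∀ b, (b ∈ acc ∨ b ∈ l) → bef1 x b = bef2 x b) →
      l.foldl (fun acc x => PySem.List.insertBy bef1 x acc) acc =
        l.foldl (fun acc x => PySem.List.insertBy bef2 x acc) acc := by
  intro l
  induction l with
  | nil => intro _ _; rfl
  | cons x t ih =>
    intro acc h
    simp only [List.foldl_cons]
    rw [pv_insertBy_congr bef1 bef2 x acc
      (fun b hb => h x (by simp) b (Or.inl hb))]
    apply ih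
    intro y hy b hb
    apply h y (by simp [hy])
    rcases hb with hb | hb
    · rcases (PySem.List.mem_insertBy bef2 x b acc).mp hb with hb | hb
      · exact Or.inr (by simp [hb])
      · exact Or.inl hb
    · exact Or.inr (by simp [hb])

lemma pv_sorted2_eq_sorted (xs : List (Int × Int)) (hx : (xs.map Prod.fst).Nodup) :
    PySem.List.sorted2 xs (fun p => p.1) (fun p => p.2) false =
      PySem.List.sorted xs (fun p => p.1) false := by
  have hinj := List.inj_on_of_nodup_map hx
  unfold PySem.List.sorted2 PySem.List.sorted
  simp only [if_neg (by simp : ¬ false = true)]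
  apply pv_foldl_insertBy_congr
  intro a ha b hb
  have hb' : b ∈ xs := by tauto
  by_cases hab : a.1 = b.1
  · have : a = b := hinj ha hb' hab
    subst this
    simp
  · rcases lt_or_gt_of_ne hab with h | h
    · simp [h, not_lt_of_gt h]
    · simp [h, not_lt_of_gt h]

lemma pv_sorted2_of_perm (xs ys : List (Int × Int)) (hx : (xs.map Prod.fst).Nodup)
    (hy : (ys.map Prod.fst).Nodup) (h : xs.Perm ys) :
    PySem.List.sorted2 xs (fun p => p.1) (fun p => p.2) false =
      PySem.List.sorted2 ys (fun p => p.1) (fun p => p.2) false := by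
  rw [pv_sorted2_eq_sorted xs hx, pv_sorted2_eq_sorted ys hy]
  apply PySem.List.sorted_eq_of_perm_of_pairwise_lt
  · exact (PySem.List.sorted_perm ys (fun p => p.1) false).trans (h.symm)
  · have hle := PySem.List.sorted_pairwise ys (fun p => p.1)
    have hperm2 : ((PySem.List.sorted ys (fun p => p.1) false).map Prod.fst).Perm
        (ys.map Prod.fst) := (PySem.List.sorted_perm ys (fun p => p.1) false).map _
    have hnd : ((PySem.List.sorted ys (fun p => p.1) false).map Prod.fst).Nodup :=
      hperm2.nodup_iff.mpr hy
    have hne : (PySem.List.sorted ys (fun p => p.1) false).Pairwise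
        (fun a b => a.1 ≠ b.1) := by
      rw [List.nodup_iff_pairwise_ne, List.pairwise_map] at hnd
      exact hnd
    exact (hle.and hne).imp (fun h => lt_of_le_of_ne h.1 h.2)

-- counters of permuted lists have permuted item lists
lemma pv_counter_items_perm (xs ys : List Int) (h : xs.Perm ys) :
    (PySem.Dict.counter xs).items.Perm (PySem.Dict.counter ys).items := by
  rw [PySem.Dict.items_counter, PySem.Dict.items_counter]
  have hmapeq : (PySem.Set.ofList xs).map (fun k => (k, (xs.count k : Int))) =
      (PySem.Set.ofList xs).map (fun k => (k, (ys.count k : Int))) := by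
    apply List.map_congr_left
    intro k _
    rw [h.count_eq]
  rw [hmapeq]
  apply List.Perm.map
  rw [List.perm_ext_iff_of_nodup (PySem.Set.nodup_ofList xs) (PySem.Set.nodup_ofList ys)]
  intro a
  rw [PySem.Set.mem_ofList, PySem.Set.mem_ofList, h.mem_iff]

theorem cycle_histogram_spec : Claim_equal_cycle_histogram := by
  intro perm _hdom _hpre
  unfold Spec_cycle_histogram cycle_histogram cycle_histogram_alt
  obtain ⟨owner', ls', starts', hA, hB, hlen', hall, hmem, hperm, hnodup⟩ :=
    pv_fold perm perm.length 0 (List.replicate perm.length (none : Option Int)) [] []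
      (by omega) (by omega) (by simp) (by omega)
      (by intro x; simp [List.mem_replicate])
      (by simp) (by simp) (by simp)
  rw [Nat.cast_zero] at hA hB
  have hmapr : (List.replicate perm.length (none : Option Int)).map
      (fun o => o.isSome) = List.replicate perm.length false := by
    simp
  have hctr : PySem.Dict.counter ([] : List Int) = PySem.Dict.empty := rfl
  rw [hmapr, hctr] at hA
  simp only [hA, hB]
  -- the two histograms are counters of permuted lists
  have hnone : (none : Option Int) ∉ owner' := by
    intro hin
    obtain ⟨i, hi, hget⟩ := List.mem_iff_getElem.mp hin
    have := hall i (by omega)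
    rw [List.getD_eq_getElem _ _ (by omega)] at this
    rw [hget] at this
    cases this
  have hsetperm : (PySem.Set.ofList owner').Perm (starts'.map some) := by
    rw [List.perm_ext_iff_of_nodup (PySem.Set.nodup_ofList owner')
      (hnodup.map (fun a b hab => Option.some_injective _ hab))]
    intro t
    rw [PySem.Set.mem_ofList]
    cases t with
    | none =>
      simp only [List.mem_map]
      constructor
      · intro h; exact absurd h hnone
      · rintro ⟨x, _, hx⟩; cases hx
    | some x =>
      rw [hmem x]
      constructor
      · intro h; exact List.mem_map.mpr ⟨x, h, rfl⟩
      · intro h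
        obtain ⟨y, hy, hxy⟩ := List.mem_map.mp h
        injection hxy with hxy
        rw [← hxy]; exact hy
  have hvals : (PySem.Dict.counter owner').values.Perm ls' := by
    have h1 : (PySem.Dict.counter owner').values =
        (PySem.Set.ofList owner').map (fun k => (owner'.count k : Int)) := by
      unfold PySem.Dict.values
      rw [PySem.Dict.items_counter]
      rw [List.map_map]
      rfl
    rw [h1]
    refine (hsetperm.map _).trans ?_
    rw [List.map_map]
    exact (hperm.symm)
  have hitems := pv_counter_items_perm ls' (PySem.Dict.counter owner').values hvals.symm
  apply pv_sorted2_of_perm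
  · have := PySem.Dict.nodup_keys_counter (κ := Int) ls'
    simpa [PySem.Dict.keys] using this
  · have := PySem.Dict.nodup_keys_counter (κ := Option Int)
    have h2 := PySem.Dict.nodup_keys_counter (κ := Int) (PySem.Dict.counter owner').values
    simpa [PySem.Dict.keys] using h2
  · exact hitems
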